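-- pv_equiv track=rewrite | github.com/condorsegura/Estrutura-de-dados-python | 04# funçao de remoçao e reoganizaçao da lista.py | removeTodos
-- ===== SOURCE A (Python) =====
-- def removeTodos(k, L, n):
--     """
--     Remove todas as ocorrências do elemento k da lista L.
--     Parâmetros:
--     k -- elemento a ser removido
--     L -- lista de onde o elemento será removido
--     n -- tamanho original da lista
--
--     Retorna:
--     Quantidade de elementos removidos.
--     """
--     removidos = 0
--     i = 0
--     while i < n - removidos:
--         if L[i] == k:
--             # Desloca todos os elementos à direita para a esquerda
--             for j in range(i, n - removidos - 1):
--                 L[j] = L[j + 1]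
--             L.pop(n - removidos - 1)  # Remove o último elemento duplicado
--             removidos += 1
--         else:
--             i += 1
--     return removidos
-- ===== SOURCE B (Python) =====
-- def removeTodos(k, L, n):
--     """Single-pass two-pointer compaction: copy kept elements forward, then truncate."""
--     removed = 0
--     w = 0
--     for i in range(n):
--         if L[i] == k:
--             removed += 1
--         else:
--             L[w] = L[i]
--             w += 1
--     del L[w:w + removed]
--     return removed
-- ===== Notes on version B (the rewrite author's own statement) =====
-- stated objective: faster
-- what changed: Replaced the while-loop that shifts the whole remaining prefix left on every match (quadratic) by a single-pass two-pointer compaction that copies kept elements forward and truncates once.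
import Mathlib
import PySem

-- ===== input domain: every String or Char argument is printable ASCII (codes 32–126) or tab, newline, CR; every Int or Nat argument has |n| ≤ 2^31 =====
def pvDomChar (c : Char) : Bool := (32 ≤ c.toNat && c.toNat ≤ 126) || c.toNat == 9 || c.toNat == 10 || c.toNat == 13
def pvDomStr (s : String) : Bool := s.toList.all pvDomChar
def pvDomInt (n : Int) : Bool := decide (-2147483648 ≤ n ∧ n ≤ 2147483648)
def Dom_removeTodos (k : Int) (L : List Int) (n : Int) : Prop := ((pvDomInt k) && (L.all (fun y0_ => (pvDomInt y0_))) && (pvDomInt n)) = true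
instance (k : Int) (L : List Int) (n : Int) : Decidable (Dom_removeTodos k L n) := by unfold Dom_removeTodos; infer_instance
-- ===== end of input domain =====

-- B replaces A's quadratic shift-and-pop while loop by a single-pass two-pointer
-- compaction; the theorems are about the RETURN value only (both Pythons also mutate L).

-- ===== PORT A =====
-- A's while loop: state (L, i, removidos); on a match the inner for-loop shifts the
-- active region left and the duplicated last element is popped.
def removeTodosGo (k n : Int) (L : List Int) (i removidos : Int) : Int :=
  if _h : i < n - removidos then
    match PySem.List.pyGet? L i with
    | none => removidos  -- IndexError in Python: outside Pre_
    | some x =>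
      if x = k then
        match PySem.List.pop? ((PySem.List.pyRange i (n - removidos - 1) 1).foldl
            (fun acc j => PySem.List.pySetD acc j (PySem.List.pyGetD acc (j + 1) 0)) L)
            (n - removidos - 1) with
        | none => removidos  -- IndexError in Python: outside Pre_
        | some r => removeTodosGo k n r.2 i (removidos + 1)
      else
        removeTodosGo k n L (i + 1) removidos
  else removidos
termination_by (n - removidos - i).toNat
decreasing_by all_goals omega

def removeTodos (k : Int) (L : List Int) (n : Int) : Int :=
  removeTodosGo k n L 0 0

-- ===== PORT B =====
-- B's for-loop: state (list, write pointer w, removed); the final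
-- 'del L[w:w+removed]' only mutates L and does not affect the returned value.
def removeTodos_alt (k : Int) (L : List Int) (n : Int) : Int :=
  let s := (PySem.List.pyRange 0 n 1).foldl
    (fun (st : List Int × Int × Int) i =>
      match PySem.List.pyGet? st.1 i with
      | none => st  -- IndexError in Python: outside Pre_
      | some x =>
        if x = k then (st.1, st.2.1, st.2.2 + 1)
        else (PySem.List.pySetD st.1 st.2.1 x, st.2.1 + 1, st.2.2))
    (L, 0, 0)
  s.2.2

-- ===== PRECONDITION & SPEC =====
-- Pre_ excludes exactly n > len(L), where both Pythons raise IndexError.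
def Pre_removeTodos (k : Int) (L : List Int) (n : Int) : Prop := n ≤ (L.length : Int)
instance (k : Int) (L : List Int) (n : Int) : Decidable (Pre_removeTodos k L n) := by
  unfold Pre_removeTodos; infer_instance

def pvWitness_removeTodos : Int × List Int × Int := (1, [1, 2, 1, 3], 4)

def Spec_removeTodos (k : Int) (L : List Int) (n : Int) (out : Int) : Prop := out = removeTodos_alt k L n
instance (k : Int) (L : List Int) (n : Int) (out : Int) : Decidable (Spec_removeTodos k L n out) := by unfold Spec_removeTodos; infer_instance

-- ===== CLAIM (what is proved, stated in full; the proofs are below) =====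
def Claim_equal_removeTodos : Prop := ∀ (k : Int) (L : List Int) (n : Int), Dom_removeTodos k L n → Pre_removeTodos k L n → Spec_removeTodos k L n (removeTodos k L n)

-- ===== LEMMAS AND PROOFS =====

-- A's inner for-loop shifts region [a, b) one place left (position b is duplicated).
lemma shift_fold (a b : Int) (L : List Int)
    (ha : 0 ≤ a) (hab : a ≤ b) (hb : b.toNat < L.length) :
    (PySem.List.pyRange a b 1).foldl
      (fun acc j => PySem.List.pySetD acc j (PySem.List.pyGetD acc (j + 1) 0)) L
    = L.take a.toNat ++ (L.drop (a.toNat + 1)).take (b - a).toNat ++ L.drop b.toNat := by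
  induction hm : (b - a).toNat generalizing a L with
  | zero =>
    have hba : a = b := by omega
    subst hba
    rw [PySem.List.pyRange_one_eq_nil (le_refl a)]
    simp
  | succ m ih =>
    have hab' : a < b := by omega
    have ha1 : a.toNat + 1 < L.length := by omega
    rw [PySem.List.pyRange_one_cons hab']
    simp only [List.foldl_cons]
    have hstep : PySem.List.pySetD L a (PySem.List.pyGetD L (a + 1) 0)
        = L.set a.toNat (L[a.toNat + 1]'ha1) := by
      rw [PySem.List.pySetD_of_nonneg _ _ ha,
          PySem.List.pyGetD_of_nonneg _ _ (show (0:Int) ≤ a + 1 by omega)]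
      have h1 : (a + 1).toNat = a.toNat + 1 := by omega
      rw [h1]
      simp [List.getD_eq_getElem?_getD, List.getElem?_eq_getElem ha1]
    rw [hstep, ih (a + 1) (L.set a.toNat (L[a.toNat + 1]'ha1)) (by omega) (by omega)
        (by simpa using hb) (by omega)]
    have hA : (a + 1).toNat = a.toNat + 1 := by omega
    rw [hA]
    rw [List.drop_set_of_lt (by omega), List.drop_set_of_lt (by omega), List.take_set,
        List.set_eq_take_cons_drop _ (by rw [List.length_take]; omega)]
    rw [List.drop_eq_getElem_cons ha1, List.take_succ_cons]
    simp [List.take_take, List.append_assoc]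

-- A's while loop counts k in the active region L[i : n - removidos].
lemma Ago_eq (k n : Int) (L : List Int) (i removidos : Int)
    (hi : 0 ≤ i) (hlen : n - removidos ≤ (L.length : Int)) :
    removeTodosGo k n L i removidos
      = removidos + (((L.drop i.toNat).take (n - removidos - i).toNat).count k : Int) := by
  induction hm : (n - removidos - i).toNat generalizing L i removidos with
  | zero =>
    rw [removeTodosGo, dif_neg (by omega)]
    simp
  | succ m ih =>
    have hlt : i < n - removidos := by omega
    have hiL : i.toNat < L.length := by omega
    have hget : PySem.List.pyGet? L i = some (L[i.toNat]'hiL) := by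
      rw [PySem.List.pyGet?_of_nonneg _ hi, List.getElem?_eq_getElem hiL]
    rw [removeTodosGo, dif_pos hlt]
    simp only [hget]
    by_cases hx : L[i.toNat]'hiL = k
    · rw [if_pos hx]
      have hb0 : (0:Int) ≤ n - removidos - 1 := by omega
      have hbL : (n - removidos - 1).toNat < L.length := by omega
      have hmid : (n - removidos - 1 - i).toNat = m := by omega
      rw [shift_fold i (n - removidos - 1) L hi (by omega) hbL, hmid]
      set P := L.take i.toNat ++ (L.drop (i.toNat + 1)).take m with hP
      have hPlen : P.length = (n - removidos - 1).toNat := by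
        simp only [hP, List.length_append, List.length_take, List.length_drop]
        omega
      have hpop := PySem.List.pop?_natCast (P ++ L.drop (n - removidos - 1).toNat)
        (n - removidos - 1).toNat
        (by simp only [List.length_append, hPlen, List.length_drop]; omega)
      rw [Int.toNat_of_nonneg hb0] at hpop
      rw [hpop]
      simp only []
      rw [List.eraseIdx_append_of_length_le (le_of_eq hPlen), hPlen, Nat.sub_self]
      rw [List.drop_eq_getElem_cons hbL, List.eraseIdx_cons_zero]
      rw [ih (P ++ L.drop ((n - removidos - 1).toNat + 1)) i (removidos + 1) hi
        (by simp only [List.length_append, hPlen, List.length_drop]; omega) (by omega)]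
      rw [hP, List.append_assoc,
          List.drop_left' (by rw [List.length_take]; omega),
          List.take_left' (by rw [List.length_take, List.length_drop]; omega)]
      rw [List.drop_eq_getElem_cons hiL, List.take_succ_cons, List.count_cons]
      simp [hx]
      push_cast
      ring
    · rw [if_neg hx]
      rw [ih L (i + 1) removidos (by omega) hlen (by omega)]
      have hi1 : (i + 1).toNat = i.toNat + 1 := by omega
      rw [hi1, List.drop_eq_getElem_cons hiL, List.take_succ_cons, List.count_cons]
      simp [hx]

-- B's fold counts k in L[j : n].
lemma Bgo_eq (k n : Int) (L : List Int) (j w removed : Int)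
    (hw : 0 ≤ w) (hwj : w ≤ j) (hlen : n ≤ (L.length : Int)) :
    ((PySem.List.pyRange j n 1).foldl
      (fun (st : List Int × Int × Int) i =>
        match PySem.List.pyGet? st.1 i with
        | none => st
        | some x =>
          if x = k then (st.1, st.2.1, st.2.2 + 1)
          else (PySem.List.pySetD st.1 st.2.1 x, st.2.1 + 1, st.2.2))
      (L, w, removed)).2.2
      = removed + (((L.drop j.toNat).take (n - j).toNat).count k : Int) := by
  induction hm : (n - j).toNat generalizing L j w removed with
  | zero =>
    rw [PySem.List.pyRange_one_eq_nil (by omega)]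
    simp
  | succ m ih =>
    have hj : 0 ≤ j := by omega
    have hjn : j < n := by omega
    have hjL : j.toNat < L.length := by omega
    have hget : PySem.List.pyGet? L j = some (L[j.toNat]'hjL) := by
      rw [PySem.List.pyGet?_of_nonneg _ hj, List.getElem?_eq_getElem hjL]
    rw [PySem.List.pyRange_one_cons hjn]
    simp only [List.foldl_cons, hget]
    have hj1 : (j + 1).toNat = j.toNat + 1 := by omega
    by_cases hx : L[j.toNat]'hjL = k
    · rw [if_pos hx]
      rw [ih L (j + 1) w (removed + 1) hw (by omega) hlen (by omega)]
      rw [hj1, List.drop_eq_getElem_cons hjL, List.take_succ_cons, List.count_cons]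
      simp [hx]
      push_cast
      ring
    · rw [if_neg hx]
      rw [PySem.List.pySetD_of_nonneg _ _ hw]
      rw [ih (L.set w.toNat (L[j.toNat]'hjL)) (j + 1) (w + 1) removed (by omega) (by omega)
        (by simpa using hlen) (by omega)]
      rw [hj1, List.drop_set_of_lt (by omega)]
      rw [List.drop_eq_getElem_cons hjL, List.take_succ_cons, List.count_cons]
      simp [hx]

-- ===== VERDICT (by name: the statement is the Claim_ definition above) =====
theorem removeTodos_spec : Claim_equal_removeTodos := by
  intro k L n _ hpre
  unfold Pre_removeTodos at hpre
  unfold Spec_removeTodos removeTodos removeTodos_alt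
  simp only []
  rw [Ago_eq k n L 0 0 le_rfl (by simpa using hpre)]
  rw [Bgo_eq k n L 0 0 0 le_rfl le_rfl hpre]
  norm_num
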